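-- pv_equiv track=rewrite | github.com/fioreale/pokerbot | working_tools/game_refiner/subgames_calculator.py | extend_to_max_length
-- ===== SOURCE A (Python) =====
-- import copy
--
-- def extend_to_max_length(payoff_vector, max_length):
--     index = 0
--     new_payoff_vector = copy.deepcopy(payoff_vector)
--     while len(new_payoff_vector) < max_length:
--         new_payoff_vector.append(payoff_vector[index])
--         index += 1
--         if index > len(payoff_vector) - 1:
--             index = 0
--     return new_payoff_vector
-- ===== SOURCE B (Python) =====
-- import copy
--
-- def extend_to_max_length(payoff_vector, max_length):
--     n = len(payoff_vector)
--     result = copy.deepcopy(payoff_vector)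
--     extra = max_length - n
--     if extra <= 0:
--         return result
--     full, rem = divmod(extra, n)
--     result.extend(payoff_vector * full)
--     result.extend(payoff_vector[:rem])
--     return result
-- ===== Notes on version B (the rewrite author's own statement) =====
-- stated objective: alternative
-- what changed: Replaces the element-at-a-time while loop with a wrapping index by a closed-form divmod: the extension is built in bulk as full copies of the list plus one prefix slice.
import Mathlib
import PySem

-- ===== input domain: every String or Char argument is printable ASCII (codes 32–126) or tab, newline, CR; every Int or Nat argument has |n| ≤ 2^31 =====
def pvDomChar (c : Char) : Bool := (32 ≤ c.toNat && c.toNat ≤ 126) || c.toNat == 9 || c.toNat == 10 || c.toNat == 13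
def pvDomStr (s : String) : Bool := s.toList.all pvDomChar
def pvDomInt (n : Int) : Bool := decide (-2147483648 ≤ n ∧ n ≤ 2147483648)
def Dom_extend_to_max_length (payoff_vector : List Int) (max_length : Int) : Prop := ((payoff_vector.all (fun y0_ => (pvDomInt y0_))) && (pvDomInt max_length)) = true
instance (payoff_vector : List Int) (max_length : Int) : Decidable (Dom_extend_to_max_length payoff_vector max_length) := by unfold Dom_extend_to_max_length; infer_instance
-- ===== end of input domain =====

-- B builds the cyclic extension in bulk with divmod instead of A's one-element-at-a-time
-- wrapping-index loop; equivalence is proved on inputs where A raises no IndexError.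

-- ===== PORT A =====
-- while loop of A: fuel = number of remaining appends (the loop adds exactly one element
-- per iteration while len < max_length); pyGet? none (IndexError on empty list) stops.
def pvAloop (pv : List Int) : Nat → List Int → Nat → List Int
  | 0, acc, _ => acc
  | fuel + 1, acc, index =>
    match PySem.List.pyGet? pv (Int.ofNat index) with
    | none => acc  -- IndexError; excluded by Pre_
    | some x =>
      pvAloop pv fuel (acc ++ [x])
        (if (index : Int) + 1 > (pv.length : Int) - 1 then 0 else index + 1)

def extend_to_max_length (payoff_vector : List Int) (max_length : Int) : List Int :=
  pvAloop payoff_vector (max_length - payoff_vector.length).toNat payoff_vector 0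

-- ===== PORT B =====
def extend_to_max_length_alt (payoff_vector : List Int) (max_length : Int) : List Int :=
  let n : Int := payoff_vector.length
  let extra : Int := max_length - n
  if extra ≤ 0 then payoff_vector
  else
    match PySem.Int.divmod? extra n with
    | none => []  -- ZeroDivisionError (empty list); excluded by Pre_
    | some (full, rem) =>
      payoff_vector ++ (List.replicate full.toNat payoff_vector).flatten
        ++ PySem.List.slice payoff_vector none (some rem)

-- ===== PRECONDITION & SPEC =====
-- Pre_ excludes exactly the inputs where Python A raises IndexError (empty list with
-- max_length > 0); B raises ZeroDivisionError there.
def Pre_extend_to_max_length (payoff_vector : List Int) (max_length : Int) : Prop :=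
  payoff_vector ≠ [] ∨ max_length ≤ 0
instance (payoff_vector : List Int) (max_length : Int) : Decidable (Pre_extend_to_max_length payoff_vector max_length) := by unfold Pre_extend_to_max_length; infer_instance

def pvWitness_extend_to_max_length : List Int × Int := ([1, 2, 3], 7)

def Spec_extend_to_max_length (payoff_vector : List Int) (max_length : Int) (out : List Int) : Prop := out = extend_to_max_length_alt payoff_vector max_length
instance (payoff_vector : List Int) (max_length : Int) (out : List Int) : Decidable (Spec_extend_to_max_length payoff_vector max_length out) := by unfold Spec_extend_to_max_length; infer_instance

-- ===== CLAIM (what is proved, stated in full; the proofs are below) =====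
def Claim_equal_extend_to_max_length : Prop := ∀ (payoff_vector : List Int) (max_length : Int), Dom_extend_to_max_length payoff_vector max_length → Pre_extend_to_max_length payoff_vector max_length → Spec_extend_to_max_length payoff_vector max_length (extend_to_max_length payoff_vector max_length)

-- ===== LEMMAS AND PROOFS =====

-- the cyclic stream of elements A appends, starting at index idx
def pvCyc (pv : List Int) : Nat → Nat → List Int
  | _, 0 => []
  | idx, fuel + 1 => pv.getD idx 0 :: pvCyc pv ((idx + 1) % pv.length) fuel

theorem pvAloop_eq_cyc (pv : List Int) (hpv : pv ≠ []) :
    ∀ (fuel : Nat) (acc : List Int) (idx : Nat), idx < pv.length →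
    pvAloop pv fuel acc idx = acc ++ pvCyc pv idx fuel := by
  intro fuel
  induction fuel with
  | zero => intro acc idx _; simp [pvAloop, pvCyc]
  | succ f ih =>
    intro acc idx hidx
    have hget : PySem.List.pyGet? pv (Int.ofNat idx) = some pv[idx] := by
      simp [PySem.List.pyGet?_ofNat pv idx hidx]
    have hlen : 0 < pv.length := List.length_pos_iff.mpr hpv
    have hnext : (if (idx : Int) + 1 > (pv.length : Int) - 1 then 0 else idx + 1)
        = (idx + 1) % pv.length := by
      split_ifs with hgt
      · have h : idx + 1 = pv.length := by omega
        rw [h, Nat.mod_self]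
      · have h2 : idx + 1 < pv.length := by push_cast at hgt; omega
        exact (Nat.mod_eq_of_lt h2).symm
    rw [pvAloop, hget, hnext]
    show pvAloop pv f (acc ++ [pv[idx]]) ((idx + 1) % pv.length) = acc ++ pvCyc pv idx (f + 1)
    rw [ih (acc ++ [pv[idx]]) ((idx + 1) % pv.length) (Nat.mod_lt _ hlen)]
    simp [pvCyc, List.getD_eq_getElem?_getD, hidx]

theorem pvCyc_small (pv : List Int) : ∀ (fuel idx : Nat), idx + fuel ≤ pv.length →
    pvCyc pv idx fuel = (pv.drop idx).take fuel := by
  intro fuel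
  induction fuel with
  | zero => intro idx _; simp [pvCyc]
  | succ f ih =>
    intro idx h
    have hidx : idx < pv.length := by omega
    rw [pvCyc, List.drop_eq_getElem_cons hidx, List.take_succ_cons]
    have hhead : pv.getD idx 0 = pv[idx] := by
      simp [List.getD_eq_getElem?_getD, hidx]
    rw [hhead]
    rcases Nat.lt_or_ge (idx + 1) pv.length with h1 | h1
    · rw [Nat.mod_eq_of_lt h1, ih (idx + 1) (by omega)]
    · have hf : f = 0 := by omega
      subst hf
      simp [pvCyc]

theorem pvCyc_append (pv : List Int) (hlen : 0 < pv.length) :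
    ∀ (f g idx : Nat), idx < pv.length →
    pvCyc pv idx (f + g) = pvCyc pv idx f ++ pvCyc pv ((idx + f) % pv.length) g := by
  intro f
  induction f with
  | zero => intro g idx hidx; simp [pvCyc, Nat.mod_eq_of_lt hidx]
  | succ f ih =>
    intro g idx hidx
    have hstep : f + 1 + g = (f + g) + 1 := by omega
    rw [hstep, pvCyc, pvCyc, ih g ((idx + 1) % pv.length) (Nat.mod_lt _ hlen)]
    have heq : ((idx + 1) % pv.length + f) % pv.length = (idx + (f + 1)) % pv.length := by
      rw [Nat.mod_add_mod, show idx + 1 + f = idx + (f + 1) by omega]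
    rw [heq]
    simp

theorem pvCyc_full (pv : List Int) :
    pvCyc pv 0 pv.length = pv := by
  have h := pvCyc_small pv pv.length 0 (by omega)
  simpa using h

theorem pvCyc_mul (pv : List Int) (hpv : pv ≠ []) :
    ∀ (q : Nat), pvCyc pv 0 (pv.length * q) = (List.replicate q pv).flatten := by
  have hlen : 0 < pv.length := List.length_pos_iff.mpr hpv
  intro q
  induction q with
  | zero => simp [pvCyc]
  | succ q ih =>
    have : pv.length * (q + 1) = pv.length + pv.length * q := by ring
    rw [this, pvCyc_append pv hlen pv.length (pv.length * q) 0 hlen]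
    simp [pvCyc_full pv, ih, List.replicate_succ]

-- ===== VERDICT (by name: the statement is the Claim_ definition above) =====
theorem extend_to_max_length_spec : Claim_equal_extend_to_max_length := by
  intro pv maxl _hdom hpre
  unfold Spec_extend_to_max_length extend_to_max_length extend_to_max_length_alt
  by_cases hle : maxl - (pv.length : Int) ≤ 0
  · have h0 : (maxl - (pv.length : Int)).toNat = 0 := by omega
    rw [h0, if_pos hle]
    rfl
  · replace hle : 0 < maxl - (pv.length : Int) := by omega
    have hpv : pv ≠ [] := by
      rcases hpre with h | h
      · exact h
      · intro hnil; subst hnil; simp at hle; omega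
    have hlen : 0 < pv.length := List.length_pos_iff.mpr hpv
    have hn0 : (pv.length : Int) ≠ 0 := by omega
    rw [if_neg (by omega)]
    set extra : Int := maxl - (pv.length : Int) with hextra
    set n : Int := (pv.length : Int) with hn
    have hnpos : (0 : Int) < n := by rw [hn]; exact_mod_cast hlen
    have hdm : PySem.Int.divmod? extra n = some (extra / n, extra % n) := by
      unfold PySem.Int.divmod?
      rw [if_neg hn0, Int.fdiv_eq_ediv_of_nonneg _ (le_of_lt hnpos)]
      simp [Int.fmod_eq_emod, le_of_lt hnpos]
    rw [hdm]
    have hq0 : 0 ≤ extra / n := Int.ediv_nonneg (le_of_lt hle) (le_of_lt hnpos)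
    have hr0 : 0 ≤ extra % n := Int.emod_nonneg extra hn0
    have hrlt : extra % n < n := Int.emod_lt_of_pos extra hnpos
    have hdecomp : n * (extra / n) + extra % n = extra := by
      have := Int.mul_ediv_add_emod extra n
      omega
    have hA : 0 ≤ n * (extra / n) := mul_nonneg (le_of_lt hnpos) hq0
    have hmulnat : ((n * (extra / n)).toNat) = pv.length * (extra / n).toNat := by
      rw [Int.toNat_mul (le_of_lt hnpos) hq0]; simp [hn]
    have hfuel : extra.toNat = pv.length * (extra / n).toNat + (extra % n).toNat := by
      omega
    have hslice : PySem.List.slice pv none (some (extra % n)) = pv.take (extra % n).toNat := by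
      rw [show (extra % n) = ((extra % n).toNat : Int) from (Int.toNat_of_nonneg hr0).symm]
      exact PySem.List.slice_to_natCast pv _
    show pvAloop pv extra.toNat pv 0 =
      pv ++ (List.replicate (extra / n).toNat pv).flatten
        ++ PySem.List.slice pv none (some (extra % n))
    rw [hslice]
    rw [pvAloop_eq_cyc pv hpv extra.toNat pv 0 hlen, hfuel,
        pvCyc_append pv hlen (pv.length * (extra / n).toNat) ((extra % n).toNat) 0 hlen]
    rw [show (0 + pv.length * (extra / n).toNat) % pv.length = 0 by simp [Nat.mul_mod_right]]
    rw [pvCyc_mul pv hpv, pvCyc_small pv ((extra % n).toNat) 0 (by simp; omega)]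
    simp
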